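-- pv_equiv track=rewrite | github.com/TadeuszSikorski/advent-of-code-python | 2015/day_01/day_01.py | create_floors
-- ===== SOURCE A (Python) =====
-- def create_floors(brackets):
--     floor = 0
--     floors = []
--
--     for bracket in brackets:
--         if bracket == "(":
--             floor += 1
--             floors.append(floor)
--         if bracket == ")":
--             floor -= 1
--             floors.append(floor)
--     return floors
-- ===== SOURCE B (Python) =====
-- def create_floors(brackets):
--     s = [c for c in brackets if c in "()"]
--     if not s:
--         return []
--
--     def solve(lo, hi):
--         # returns (total delta of s[lo:hi], floor levels of s[lo:hi] starting from 0)
--         if hi - lo == 1: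
--             d = 1 if s[lo] == "(" else -1
--             return d, [d]
--         mid = (lo + hi) // 2
--         tl, ll = solve(lo, mid)
--         tr, lr = solve(mid, hi)
--         return tl + tr, ll + [tl + x for x in lr]
--
--     return solve(0, len(s))[1]
-- ===== Notes on version B (the rewrite author's own statement) =====
-- stated objective: alternative
-- what changed: Replaces the single left-to-right counter loop by a divide-and-conquer: filter the brackets, split the list in half, recursively compute each half's (total delta, floor levels) and merge by shifting the right half's levels by the left half's total.
import Mathlib
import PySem

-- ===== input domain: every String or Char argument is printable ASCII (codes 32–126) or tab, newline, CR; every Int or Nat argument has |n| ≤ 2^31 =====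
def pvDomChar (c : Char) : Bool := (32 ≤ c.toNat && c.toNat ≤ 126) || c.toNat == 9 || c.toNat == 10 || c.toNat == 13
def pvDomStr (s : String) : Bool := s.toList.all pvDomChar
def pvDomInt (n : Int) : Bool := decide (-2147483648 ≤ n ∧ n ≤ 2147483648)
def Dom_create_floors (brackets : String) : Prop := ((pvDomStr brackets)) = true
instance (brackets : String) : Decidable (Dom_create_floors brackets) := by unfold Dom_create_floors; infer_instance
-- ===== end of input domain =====

-- B replaces the single counter loop by divide-and-conquer on the filtered bracket list; objective: alternative.

-- ===== PORT A =====
-- one loop over the characters carrying (floor, floors), appending as Python does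
def create_floors (brackets : String) : List Int :=
  (brackets.toList.foldl
    (fun st bracket =>
      let st1 := if bracket = '(' then (st.1 + 1, st.2 ++ [st.1 + 1]) else st
      if bracket = ')' then (st1.1 - 1, st1.2 ++ [st1.1 - 1]) else st1)
    (0, [])).2

-- ===== PORT B =====
-- solve(lo, hi) on the filtered list, ported as recursion on the sublist (take/drop at mid):
-- returns (total delta, floor levels starting from 0); merge shifts the right levels by the left total
def cfSolve (s : List Char) : Int × List Int :=
  if _h : s.length ≤ 1 then
    match s with
    | [] => (0, [])
    | c :: _ => ((if c = '(' then (1 : Int) else -1), [if c = '(' then (1 : Int) else -1])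
  else
    let mid := s.length / 2
    let l := cfSolve (s.take mid)
    let r := cfSolve (s.drop mid)
    (l.1 + r.1, l.2 ++ r.2.map (fun x => l.1 + x))
termination_by s.length
decreasing_by
  · simp only [List.length_take]; omega
  · simp only [List.length_drop]; omega

def create_floors_alt (brackets : String) : List Int :=
  let s := brackets.toList.filter (fun c => c = '(' || c = ')')
  if s = [] then [] else (cfSolve s).2

-- ===== PRECONDITION & SPEC =====
def Spec_create_floors (brackets : String) (out : List Int) : Prop := out = create_floors_alt brackets
instance (brackets : String) (out : List Int) : Decidable (Spec_create_floors brackets out) := by unfold Spec_create_floors; infer_instance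

-- ===== CLAIM (what is proved, stated in full; the proofs are below) =====
def Claim_equal_create_floors : Prop := ∀ (brackets : String), Dom_create_floors brackets → Spec_create_floors brackets (create_floors brackets)

-- ===== LEMMAS AND PROOFS =====

-- reference semantics: deltas and running sums
def cfDeltas (cs : List Char) : List Int :=
  cs.filterMap (fun b => if b = '(' ∨ b = ')' then some (if b = '(' then 1 else -1) else none)

def cfAccum (a : Int) : List Int → List Int
  | [] => []
  | d :: ds => (a + d) :: cfAccum (a + d) ds

theorem cf_fold_eq (cs : List Char) (f : Int) (acc : List Int) :
    (cs.foldl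
      (fun st bracket =>
        let st1 := if bracket = '(' then (st.1 + 1, st.2 ++ [st.1 + 1]) else st
        if bracket = ')' then (st1.1 - 1, st1.2 ++ [st1.1 - 1]) else st1)
      (f, acc)).2 = acc ++ cfAccum f (cfDeltas cs) := by
  induction cs generalizing f acc with
  | nil => simp [cfDeltas, cfAccum]
  | cons c cs ih =>
    by_cases h1 : c = '('
    · simp [List.foldl, h1, cfDeltas, List.filterMap, ih, cfAccum]
    · by_cases h2 : c = ')'
      · simp [List.foldl, h2, cfDeltas, List.filterMap, ih, cfAccum]
        simp [sub_eq_add_neg]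
      · simp [List.foldl, h1, h2, cfDeltas, List.filterMap, ih]

theorem cfAccum_append (a : Int) (l1 l2 : List Int) :
    cfAccum a (l1 ++ l2) = cfAccum a l1 ++ cfAccum (a + l1.sum) l2 := by
  induction l1 generalizing a with
  | nil => simp [cfAccum]
  | cons d ds ih => simp [cfAccum, ih, add_assoc]

theorem cfAccum_shift (a b : Int) (l : List Int) :
    cfAccum (a + b) l = (cfAccum b l).map (fun x => a + x) := by
  induction l generalizing b with
  | nil => simp [cfAccum]
  | cons d ds ih =>
    simp [cfAccum]
    constructor
    · ring
    · rw [show a + b + d = a + (b + d) by ring, ih]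

theorem cfDeltas_filter (cs : List Char) :
    cfDeltas (cs.filter (fun c => c = '(' || c = ')')) = cfDeltas cs := by
  induction cs with
  | nil => rfl
  | cons c cs ih =>
    by_cases h1 : c = '(' <;> by_cases h2 : c = ')' <;>
      simp [cfDeltas, List.filter, h1, h2] at * <;> exact ih

theorem cfSolve_spec (s : List Char) (hne : s ≠ []) (hb : ∀ c ∈ s, c = '(' ∨ c = ')') :
    cfSolve s = ((cfDeltas s).sum, cfAccum 0 (cfDeltas s)) := by
  induction s using cfSolve.induct with
  | case1 _h _h2 => exact absurd rfl hne
  | case2 c tail hlen _h2 =>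
    have ht : tail = [] := by
      cases tail with
      | nil => rfl
      | cons a b => simp at hlen
    subst ht
    rcases hb c (by simp) with h1 | h1 <;>
      simp [cfSolve, cfDeltas, cfAccum, h1]
  | case3 s h mid ihl ihr =>
    have hm : mid = s.length / 2 := rfl
    have hmid1 : 1 ≤ mid := by omega
    have hmidlt : mid < s.length := by omega
    have htne : s.take mid ≠ [] := by
      intro he
      rcases List.take_eq_nil_iff.mp he with h0 | h0
      · omega
      · rw [h0] at h; simp at h
    have hdne : s.drop mid ≠ [] := by
      intro he
      have := List.drop_eq_nil_iff.mp he
      omega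
    have il := ihl htne (fun c hc => hb c (List.mem_of_mem_take hc))
    have ir := ihr hdne (fun c hc => hb c (List.mem_of_mem_drop hc))
    have hsplit : cfDeltas s = cfDeltas (s.take mid) ++ cfDeltas (s.drop mid) := by
      simp only [cfDeltas]
      rw [← List.filterMap_append, List.take_append_drop]
    rw [cfSolve]
    simp only [dif_neg h]
    rw [← hm, il, ir, hsplit, cfAccum_append, List.sum_append]
    refine Prod.ext rfl ?_
    simp only [zero_add]
    rw [show (cfDeltas (s.take mid)).sum = (cfDeltas (s.take mid)).sum + 0 by ring, cfAccum_shift]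
    simp

theorem create_floors_spec : Claim_equal_create_floors := by
  intro brackets _
  unfold Spec_create_floors create_floors create_floors_alt
  rw [cf_fold_eq brackets.toList 0 []]
  by_cases hs : brackets.toList.filter (fun c => c = '(' || c = ')') = []
  · simp only [hs, List.nil_append]
    have : cfDeltas brackets.toList = [] := by
      rw [← cfDeltas_filter, hs]; rfl
    simp [this, cfAccum]
  · simp only [if_neg hs, List.nil_append]
    rw [cfSolve_spec _ hs (by intro c hc; have := List.of_mem_filter hc; simpa using this)]
    rw [cfDeltas_filter]
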